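-- pv_equiv track=rewrite | github.com/LuckyMax0722/ADSE_2023 | Homework1.3/task3.py | lowest_missing_number
-- ===== SOURCE A (Python) =====
-- def lowest_missing_number(list_in):
--     """
--     input:
--         list_in (type: list): list of integers
--
--     output:
--         lowest_number (type: int or None)
--     """
--
--     # Task:
--     # ToDo: Calculate the lowest missing number of the list, starting from 0. Return "None" if there is no lowest
--     #       missing number. The usage of python packages is not allowed for this task.
--     # Hint: e.g. L = [3, 6, 1, 0, 9, 7, 2] the function should return 4
--     ########################
--     #  Start of your code  #
--     ########################
--     list_in.sort(reverse=False)
--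
--     check = 0
--     while check < len(list_in):
--         if check == list_in[check]:
--             lowest_number = None
--         else:
--             lowest_number = check
--             break
--         check = check + 1
--
--     ########################
--     #   End of your code   #
--     ########################
--
--     return lowest_number
-- ===== SOURCE B (Python) =====
-- def lowest_missing_number(list_in):
--     """
--     input:
--         list_in (type: list): list of integers
--
--     output:
--         lowest_number (type: int or None)
--     """
--     present = set(list_in)
--     for i in range(len(list_in)):
--         if i not in present:
--             return i
--     return None
-- ===== Notes on version B (the rewrite author's own statement) =====
-- stated objective: simpler
-- what changed: replaced sort-then-scan-for-first-fixed-point-violation by a hash set of the values plus a scan of i = 0..n-1 for the first value absent from the set (no sort); the empty list, on which A raises UnboundLocalError, is excluded by Pre_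
-- intended difference: On lists that contain 0 together with a negative value, or a duplicated value v >= 0 with all of 0..v+1 present, A returns the first index where the sorted list differs from its index, which is a number still present in the list (e.g. A([0,0,1]) = 1); B returns the smallest integer >= 0 absent from the list (2 there), which is the intended 'lowest missing number'. — e.g. on lowest_missing_number([0, 0, 1]): A returns some 1, B returns some 2
import Mathlib
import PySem

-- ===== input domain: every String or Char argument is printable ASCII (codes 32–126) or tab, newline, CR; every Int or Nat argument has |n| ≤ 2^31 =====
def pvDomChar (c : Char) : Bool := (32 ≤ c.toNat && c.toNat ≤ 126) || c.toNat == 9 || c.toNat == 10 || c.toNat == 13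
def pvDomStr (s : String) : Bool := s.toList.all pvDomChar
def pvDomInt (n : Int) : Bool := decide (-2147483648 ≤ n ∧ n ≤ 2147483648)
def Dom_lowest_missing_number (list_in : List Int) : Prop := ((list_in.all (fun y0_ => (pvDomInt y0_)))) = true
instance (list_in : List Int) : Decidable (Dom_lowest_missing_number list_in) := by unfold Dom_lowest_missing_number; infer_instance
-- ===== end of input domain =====

-- B replaces A's sort-then-scan by a hash set of the values plus a scan for the first absent index (no sort);
-- A sorts list_in in place (caller-visible mutation; B does not mutate) — the equivalence proved is about the return value.

-- ===== PORT A =====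
-- while check < len(s): if check == s[check]: lowest_number = None; check += 1 else: lowest_number = check; break
def lmnLoop (xs : List Int) (check : Nat) : Option Int :=
  if h : check < xs.length then
    if (check : Int) = xs[check] then lmnLoop xs (check + 1)
    else some (check : Int)
  else none
  termination_by xs.length - check

def lowest_missing_number (list_in : List Int) : Option Int :=
  lmnLoop (PySem.List.sorted list_in (fun x => x) false) 0

-- ===== PORT B =====
-- present = set(list_in); for i in range(len(list_in)): if i not in present: return i / return None
def altAbsent (list_in : List Int) (i : Nat) : Bool :=
  !(PySem.Set.contains (PySem.Set.ofList list_in) (i : Int))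

def lowest_missing_number_alt (list_in : List Int) : Option Int :=
  ((List.range list_in.length).find? (altAbsent list_in)).map (fun i : Nat => (i : Int))

-- ===== PRECONDITION & SPEC =====
-- A raises UnboundLocalError on the empty list (the loop body never runs), so it is excluded.
def Pre_lowest_missing_number (list_in : List Int) : Prop := list_in ≠ []
instance (list_in : List Int) : Decidable (Pre_lowest_missing_number list_in) := by unfold Pre_lowest_missing_number; infer_instance
def pvWitness_lowest_missing_number : List Int := ([3, 6, 1, 0, 9, 7, 2])

-- On lists containing 0 together with a negative value, or a duplicated value v ≥ 0 with all of
-- 0..v+1 present, A returns the first index where the sorted list differs from its index — a number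
-- that is still present in the list (e.g. A([0,0,1]) = 1); B returns the smallest integer ≥ 0 absent
-- from the list (2 there), which is the intended "lowest missing number".
def D_lowest_missing_number (list_in : List Int) : Prop :=
  ((0 : Int) ∈ list_in ∧ ∃ x ∈ list_in, x < 0) ∨
  (∃ v ∈ list_in, 0 ≤ v ∧ v + 2 ≤ (list_in.length : Int) ∧ 2 ≤ list_in.count v ∧
    ∀ j ∈ List.range (v.toNat + 2), (j : Int) ∈ list_in)
instance (list_in : List Int) : Decidable (D_lowest_missing_number list_in) := by
  unfold D_lowest_missing_number; infer_instance

def Spec_lowest_missing_number (list_in : List Int) (out : Option Int) : Prop :=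
  ¬ D_lowest_missing_number list_in → out = lowest_missing_number_alt list_in
instance (list_in : List Int) (out : Option Int) : Decidable (Spec_lowest_missing_number list_in out) := by
  unfold Spec_lowest_missing_number; infer_instance

def pvDiffWitness_lowest_missing_number : List Int := ([0, 0, 1])
def pvDiffWitnessOut_lowest_missing_number : (Option Int) × (Option Int) := (some 1, some 2)

-- ===== CLAIM (what is proved, stated in full; the proofs are below) =====
def Claim_unchanged_lowest_missing_number : Prop := ∀ (list_in : List Int), Dom_lowest_missing_number list_in → Pre_lowest_missing_number list_in → Spec_lowest_missing_number list_in (lowest_missing_number list_in)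
def Claim_changed_lowest_missing_number : Prop := Dom_lowest_missing_number (pvDiffWitness_lowest_missing_number) ∧ Pre_lowest_missing_number (pvDiffWitness_lowest_missing_number) ∧ D_lowest_missing_number (pvDiffWitness_lowest_missing_number) ∧ lowest_missing_number (pvDiffWitness_lowest_missing_number) = pvDiffWitnessOut_lowest_missing_number.1 ∧ lowest_missing_number_alt (pvDiffWitness_lowest_missing_number) = pvDiffWitnessOut_lowest_missing_number.2 ∧ pvDiffWitnessOut_lowest_missing_number.1 ≠ pvDiffWitnessOut_lowest_missing_number.2

def Claim_exact_lowest_missing_number : Prop := ∀ (list_in : List Int), Dom_lowest_missing_number list_in → Pre_lowest_missing_number list_in → D_lowest_missing_number list_in → lowest_missing_number list_in ≠ lowest_missing_number_alt list_in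

-- ===== LEMMAS AND PROOFS =====

-- two distinct positions with equal values give count ≥ 2
theorem two_le_count_of_getElem (s : List Int) (i j : Nat) (hij : i < j) (hj : j < s.length)
    (h : s[i]'(by omega) = s[j]) : 2 ≤ s.count (s[j]) := by
  have hi : i < s.length := by omega
  have htake : s[j] ∈ s.take j := by
    rw [← h]
    have hti : i < (s.take j).length := by simp; omega
    have : (s.take j)[i] = s[i] := by
      simp [List.getElem_take]
    rw [← this]
    exact List.getElem_mem hti
  have hdrop : s[j] ∈ s.drop j := by
    have hdi : 0 < (s.drop j).length := by simp; omega
    have : (s.drop j)[0] = s[j] := by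
      simp [List.getElem_drop]
    rw [← this]
    exact List.getElem_mem hdi
  generalize hv : s[j] = v at htake hdrop
  have hsplit : s.count v = (s.take j).count v + (s.drop j).count v := by
    conv_lhs => rw [← List.take_append_drop j s]
    rw [List.count_append]
  have c1 : 0 < (s.take j).count v := List.count_pos_iff.mpr htake
  have c2 : 0 < (s.drop j).count v := List.count_pos_iff.mpr hdrop
  omega

-- if A's scan of the sorted list stops at an index k that is still present in the list, D_ holds
theorem crux (l s : List Int) (hperm : s.Perm l) (hs : s.Pairwise (· ≤ ·))
    (k : Nat) (hk : k < s.length)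
    (hinv : ∀ j : Nat, (hj : j < s.length) → j < k → s[j] = (j : Int))
    (hkl : (k : Int) ∈ l) (hne : s[k] ≠ (k : Int)) : D_lowest_missing_number l := by
  have hsub : ∀ x ∈ s, x ∈ l := fun x hx => (hperm.mem_iff).mp hx
  have h0l : (0 : Int) ∈ l := by
    rcases Nat.eq_zero_or_pos k with h0 | hpos
    · subst h0; simpa using hkl
    · have h0s : s[0]'(by omega) = ((0 : Nat) : Int) := hinv 0 (by omega) hpos
      have : s[0]'(by omega) ∈ s := List.getElem_mem (by omega)
      rw [h0s] at this
      simpa using hsub _ this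
  by_cases hneg : ∃ x ∈ l, x < 0
  · exact Or.inl ⟨h0l, hneg⟩
  · push Not at hneg
    have hks : (k : Int) ∈ s := (hperm.mem_iff).mpr hkl
    obtain ⟨idx, hidx, hsk⟩ := List.mem_iff_getElem.mp hks
    have hpw := List.pairwise_iff_getElem.mp hs
    have hidxk : ¬ idx < k := by
      intro h
      have := hinv idx hidx h
      rw [this] at hsk
      have : idx = k := by exact_mod_cast hsk
      omega
    have hidxne : idx ≠ k := by
      intro h; subst h; exact hne hsk
    have hkidx : k < idx := by omega
    have hle : s[k] ≤ (k : Int) := by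
      have := hpw k idx hk hidx hkidx
      rw [hsk] at this; exact this
    have hlt : s[k] < (k : Int) := lt_of_le_of_ne hle hne
    cases k with
    | zero =>
      have : (0 : Int) ≤ s[0] := hneg _ (hsub _ (List.getElem_mem hk))
      simp at hlt; omega
    | succ j =>
      have hj : j < s.length := by omega
      have hsj : s[j] = (j : Int) := hinv j hj (by omega)
      have h1 : s[j] ≤ s[j + 1] := hpw j (j + 1) hj hk (by omega)
      have hskj : s[j + 1] = (j : Int) := by
        rw [hsj] at h1; push_cast at hlt; omega
      have hcnt_s : 2 ≤ s.count ((j : Int)) := by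
        have := two_le_count_of_getElem s j (j + 1) (by omega) hk (by rw [hsj, hskj])
        rwa [hskj] at this
      have hl2 : ((j : Int)) + 2 ≤ (l.length : Int) := by
        have := hperm.length_eq
        have : j + 2 ≤ l.length := by omega
        omega
      refine Or.inr ⟨(j : Int), ?_, by positivity, hl2, ?_, ?_⟩
      · have : s[j] ∈ s := List.getElem_mem hj
        rw [hsj] at this; exact hsub _ this
      · rw [← hperm.count_eq]; exact hcnt_s
      · intro m hm
        rw [List.mem_range] at hm
        have hmle : m ≤ j + 1 := by
          have : ((j : Int)).toNat = j := by simp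
          omega
        rcases Nat.lt_or_ge m (j + 1) with hmlt | hmge
        · have hms : s[m]'(by omega) = (m : Int) := hinv m (by omega) (by omega)
          have hmm : s[m]'(by omega) ∈ s := List.getElem_mem (by omega)
          rw [hms] at hmm; exact hsub _ hmm
        · have : m = j + 1 := by omega
          subst this; exact hkl

-- ===== tightness lemmas =====

theorem alt_none_or_absent (l : List Int) :
    lowest_missing_number_alt l = none ∨
      ∃ i : Nat, lowest_missing_number_alt l = some (i : Int) ∧ ((i : Int)) ∉ l := by
  unfold lowest_missing_number_alt
  cases hf : (List.range l.length).find? (altAbsent l) with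
  | none => left; rfl
  | some i =>
    right
    refine ⟨i, by simp, ?_⟩
    have hp := List.find?_some hf
    simpa [altAbsent] using hp

theorem lmnLoop_stops_le (s : List Int) (j t : Nat) (ht : t < s.length) (hj : j ≤ t)
    (hne : s[t] ≠ (t : Int)) : ∃ k : Nat, k ≤ t ∧ lmnLoop s j = some (k : Int) := by
  rw [lmnLoop, dif_pos (by omega : j < s.length)]
  by_cases hsj : (j : Int) = s[j]
  · rw [if_pos hsj]
    have hjt : j ≠ t := by
      intro h; subst h; exact hne hsj.symm
    obtain ⟨k, hk, hres⟩ := lmnLoop_stops_le s (j + 1) t ht (by omega) hne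
    exact ⟨k, hk, hres⟩
  · rw [if_neg hsj]
    exact ⟨j, hj, rfl⟩
  termination_by t - j

theorem exists_mismatch (s : List Int) (hs : s.Pairwise (· ≤ ·)) (v : Nat)
    (hlen : v + 2 ≤ s.length) (hcnt : 2 ≤ s.count ((v : Nat) : Int)) :
    ∃ t : Nat, t ≤ v + 1 ∧ ∃ ht : t < s.length, s[t]'ht ≠ (t : Int) := by
  by_contra hcon
  push Not at hcon
  have hid : ∀ t : Nat, t ≤ v + 1 → ∀ (ht : t < s.length), s[t]'ht = (t : Int) :=
    fun t hle ht => hcon t hle ht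
  have hpw := List.pairwise_iff_getElem.mp hs
  have htake : s.take (v + 2) = (List.range (v + 2)).map (fun i : Nat => (i : Int)) := by
    apply List.ext_getElem
    · simp; omega
    · intro i hi1 hi2
      have hiv : i < v + 2 := by simpa using hi2
      have hilen : i < s.length := by omega
      rw [List.getElem_take, List.getElem_map, List.getElem_range]
      exact hid i (by omega) hilen
  have hcnt_take : (s.take (v + 2)).count ((v : Nat) : Int) = 1 := by
    rw [htake, List.count_map_of_injective _ _ (fun a b h => by exact_mod_cast h)]
    rw [List.count_range]
    simp
  have hcnt_drop : (s.drop (v + 2)).count ((v : Nat) : Int) = 0 := by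
    rw [List.count_eq_zero]
    intro hmem
    obtain ⟨i, hi, hieq⟩ := List.mem_iff_getElem.mp hmem
    rw [List.getElem_drop] at hieq
    have hi' : v + 2 + i < s.length := by
      have := hi; simp at this; omega
    have h1 : s[v + 1]'(by omega) ≤ s[v + 2 + i]'hi' :=
      hpw (v + 1) (v + 2 + i) (by omega) hi' (by omega)
    rw [hid (v + 1) (by omega) (by omega), hieq] at h1
    push_cast at h1
    omega
  have hsplit : s.count ((v : Nat) : Int) =
      (s.take (v + 2)).count ((v : Nat) : Int) + (s.drop (v + 2)).count ((v : Nat) : Int) := by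
    conv_lhs => rw [← List.take_append_drop (v + 2) s]
    rw [List.count_append]
  omega

-- main loop correspondence: A's loop from index k equals B's find? over the remaining range
theorem loops_eq (l s : List Int) (hperm : s.Perm l) (hs : s.Pairwise (· ≤ ·))
    (hD : ¬ D_lowest_missing_number l) (k : Nat)
    (hinv : ∀ j : Nat, (hj : j < s.length) → j < k → s[j] = (j : Int)) :
    lmnLoop s k =
      (((List.range l.length).drop k).find? (altAbsent l)).map (fun i : Nat => (i : Int)) := by
  have hlen : s.length = l.length := hperm.length_eq
  by_cases hk : k < l.length
  · have hk' : k < s.length := by omega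
    have hdrop : (List.range l.length).drop k = k :: (List.range l.length).drop (k + 1) := by
      rw [List.drop_eq_getElem_cons (by simpa using hk)]
      simp
    rw [lmnLoop, dif_pos hk', hdrop, List.find?_cons]
    by_cases hkl : ((k : Nat) : Int) ∈ l
    · have hsk : s[k] = ((k : Nat) : Int) := by
        by_contra hne
        exact hD (crux l s hperm hs k hk' hinv hkl hne)
      rw [if_pos hsk.symm]
      have hcond : altAbsent l k = false := by
        simp [altAbsent]; exact hkl
      rw [hcond]
      exact loops_eq l s hperm hs hD (k + 1) (by
        intro j hj hjk
        rcases Nat.lt_or_ge j k with h | h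
        · exact hinv j hj h
        · have : j = k := by omega
          subst this; exact hsk)
    · have hsk : s[k] ≠ ((k : Nat) : Int) := by
        intro h
        have : s[k] ∈ s := List.getElem_mem hk'
        rw [h] at this
        exact hkl ((hperm.mem_iff).mp this)
      rw [if_neg (fun h => hsk h.symm)]
      have hcond : altAbsent l k = true := by
        simp [altAbsent]; exact hkl
      rw [hcond]
      simp
  · rw [lmnLoop, dif_neg (by omega)]
    rw [List.drop_eq_nil_of_le (by simpa using (by omega : l.length ≤ k))]
    simp
  termination_by l.length - k

-- ===== VERDICT (by name: the statement is the Claim_ definition above) =====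
theorem lowest_missing_number_spec : Claim_unchanged_lowest_missing_number := by
  intro l _ _ hD
  unfold lowest_missing_number lowest_missing_number_alt
  rw [show (List.range l.length) = (List.range l.length).drop 0 from rfl]
  exact loops_eq l _ (PySem.List.sorted_perm l (fun x => x) false)
    (by simpa using PySem.List.sorted_pairwise l (fun x => x)) hD 0
    (by intro j hj h; omega)

theorem lowest_missing_number_changed : Claim_changed_lowest_missing_number := by
  unfold Claim_changed_lowest_missing_number
  refine ⟨by decide, by decide, by decide, ?_, by decide, by decide⟩
  show lowest_missing_number [0, 0, 1] = some 1
  unfold lowest_missing_number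
  have hsorted : PySem.List.sorted [(0 : Int), 0, 1] (fun x => x) false = [0, 0, 1] := by decide
  rw [hsorted]
  rw [lmnLoop]; norm_num
  rw [lmnLoop]; norm_num

theorem lowest_missing_number_tight : Claim_exact_lowest_missing_number := by
  intro l _ hpre hD
  unfold lowest_missing_number
  have hperm := PySem.List.sorted_perm l (fun x => x) false
  have hs : (PySem.List.sorted l (fun x => x) false).Pairwise (· ≤ ·) := by
    simpa using PySem.List.sorted_pairwise l (fun x => x)
  set s := PySem.List.sorted l (fun x => x) false with hsdef
  have hlen : s.length = l.length := hperm.length_eq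
  have hAmem : ∃ k : Nat, lmnLoop s 0 = some (k : Int) ∧ ((k : Nat) : Int) ∈ l := by
    rcases hD with ⟨h0, x, hxl, hxneg⟩ | ⟨v, hvl, hv0, hvlen, hvcnt, hvall⟩
    · -- a negative element: the sorted head is negative, the loop stops at index 0
      have hne : l ≠ [] := by intro h; subst h; simp at h0
      have hlpos : 0 < s.length := by
        rw [hlen]; cases l with | nil => exact absurd rfl hne | cons a t => simp
      have hxs : x ∈ s := (hperm.mem_iff).mpr hxl
      obtain ⟨ix, hix, hixeq⟩ := List.mem_iff_getElem.mp hxs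
      have h0le : s[0] ≤ x := by
        rcases Nat.eq_zero_or_pos ix with h | h
        · subst h; rw [hixeq]
        · have := (List.pairwise_iff_getElem.mp hs) 0 ix hlpos hix h
          rw [hixeq] at this; exact this
      have hne0 : s[0] ≠ ((0 : Nat) : Int) := by
        intro h; rw [h] at h0le; simp at h0le; omega
      obtain ⟨k, hk, hres⟩ := lmnLoop_stops_le s 0 0 hlpos (by omega) hne0
      refine ⟨k, hres, ?_⟩
      have : k = 0 := by omega
      subst this; simpa using h0
    · -- a duplicated v with 0..v+1 present: the loop stops at some index ≤ v+1
      have hvnat : ((v.toNat : Nat) : Int) = v := by omega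
      have hcnt_s : 2 ≤ s.count ((v.toNat : Nat) : Int) := by
        rw [hvnat, hperm.count_eq]; exact hvcnt
      have hlen2 : v.toNat + 2 ≤ s.length := by rw [hlen]; omega
      obtain ⟨t, htle, ht, htne⟩ := exists_mismatch s hs v.toNat hlen2 hcnt_s
      obtain ⟨k, hk, hres⟩ := lmnLoop_stops_le s 0 t ht (by omega) htne
      refine ⟨k, hres, ?_⟩
      exact hvall k (List.mem_range.mpr (by omega))
  obtain ⟨k, hA, hkl⟩ := hAmem
  rcases alt_none_or_absent l with hB | ⟨i, hB, hil⟩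
  · rw [hA, hB]; simp
  · rw [hA, hB]
    intro h
    have : (k : Int) = (i : Int) := by simpa using h
    rw [this] at hkl
    exact hil hkl
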